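-- pv_equiv track=rewrite | github.com/thebaysix/elmstash | src/observer/analysis/patterns.py | _categorize_lengths
-- ===== SOURCE A (Python) =====
-- from typing import Dict, List, Any, Tuple
--
-- def _categorize_lengths(lengths: List[int]) -> Dict[str, int]:
--     """Categorize lengths into ranges."""
--     categories = {
--         'very_short': 0,    # 0-50 chars
--         'short': 0,         # 51-150 chars
--         'medium': 0,        # 151-500 chars
--         'long': 0,          # 501-1000 chars
--         'very_long': 0      # 1000+ chars
--     }
--
--     for length in lengths:
--         if length <= 50:
--             categories['very_short'] += 1
--         elif length <= 150:
--             categories['short'] += 1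
--         elif length <= 500:
--             categories['medium'] += 1
--         elif length <= 1000:
--             categories['long'] += 1
--         else:
--             categories['very_long'] += 1
--
--     return categories
-- ===== SOURCE B (Python) =====
-- def _categorize_lengths(lengths):
--     """Categorize lengths into ranges."""
--     # Cumulative counting: count how many lengths fall at or below each
--     # boundary, then each bucket is the difference of adjacent cumulative
--     # counts. No per-element bucket dispatch, no mutable accumulator dict.
--     n = len(lengths)
--     le50 = sum(1 for L in lengths if L <= 50)
--     le150 = sum(1 for L in lengths if L <= 150)
--     le500 = sum(1 for L in lengths if L <= 500)
--     le1000 = sum(1 for L in lengths if L <= 1000)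
--     return {
--         'very_short': le50,
--         'short': le150 - le50,
--         'medium': le500 - le150,
--         'long': le1000 - le500,
--         'very_long': n - le1000,
--     }
-- ===== Notes on version B (the rewrite author's own statement) =====
-- stated objective: alternative
-- what changed: Replaces the single-pass per-element five-way if/elif bucket dispatch into a mutable dict by staged passes computing cumulative threshold counts (how many lengths are <= each boundary) and returning adjacent differences.
import Mathlib
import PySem

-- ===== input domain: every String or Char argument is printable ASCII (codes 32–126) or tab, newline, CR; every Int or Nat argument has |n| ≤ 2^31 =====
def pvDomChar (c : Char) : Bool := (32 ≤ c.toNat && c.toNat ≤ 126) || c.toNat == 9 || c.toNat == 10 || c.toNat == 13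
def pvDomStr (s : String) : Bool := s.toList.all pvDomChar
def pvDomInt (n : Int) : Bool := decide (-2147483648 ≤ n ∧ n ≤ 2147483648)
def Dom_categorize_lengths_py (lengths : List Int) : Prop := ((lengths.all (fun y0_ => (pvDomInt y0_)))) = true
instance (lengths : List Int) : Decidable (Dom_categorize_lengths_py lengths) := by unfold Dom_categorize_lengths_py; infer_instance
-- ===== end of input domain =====

-- B replaces A's per-element five-way if/elif dispatch into a mutable dict by staged passes
-- computing cumulative threshold counts and returning adjacent differences (alternative; same O(n)).

-- ===== PORT A =====
def pvStepA (d : PySem.Dict String Int) (length : Int) : PySem.Dict String Int :=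
  if length ≤ 50 then d.modify "very_short" 0 (· + 1)
  else if length ≤ 150 then d.modify "short" 0 (· + 1)
  else if length ≤ 500 then d.modify "medium" 0 (· + 1)
  else if length ≤ 1000 then d.modify "long" 0 (· + 1)
  else d.modify "very_long" 0 (· + 1)

def categorize_lengths_py (lengths : List Int) : List (String × Int) :=
  let categories : PySem.Dict String Int :=
    PySem.Dict.ofList [("very_short", 0), ("short", 0), ("medium", 0), ("long", 0), ("very_long", 0)]
  (lengths.foldl pvStepA categories).items

-- ===== PORT B =====
-- sum(1 for L in lengths if L <= b) : one pass per boundary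
def pvCountLE (lengths : List Int) (b : Int) : Int :=
  (lengths.countP (fun L => decide (L ≤ b)) : Nat)

def categorize_lengths_py_alt (lengths : List Int) : List (String × Int) :=
  let n : Int := (lengths.length : Nat)
  let le50 := pvCountLE lengths 50
  let le150 := pvCountLE lengths 150
  let le500 := pvCountLE lengths 500
  let le1000 := pvCountLE lengths 1000
  [("very_short", le50), ("short", le150 - le50), ("medium", le500 - le150),
   ("long", le1000 - le500), ("very_long", n - le1000)]

-- ===== PRECONDITION & SPEC =====
def Spec_categorize_lengths_py (lengths : List Int) (out : List (String × Int)) : Prop := out = categorize_lengths_py_alt lengths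
instance (lengths : List Int) (out : List (String × Int)) : Decidable (Spec_categorize_lengths_py lengths out) := by unfold Spec_categorize_lengths_py; infer_instance

-- ===== CLAIM (what is proved, stated in full; the proofs are below) =====
def Claim_equal_categorize_lengths_py : Prop := ∀ (lengths : List Int), Dom_categorize_lengths_py lengths → Spec_categorize_lengths_py lengths (categorize_lengths_py lengths)

-- ===== LEMMAS AND PROOFS =====

-- Invariant of A's fold, stated in B's cumulative-difference shape.
theorem pvInv (xs : List Int) (a b c d e : Int) :
    (xs.foldl pvStepA (PySem.Dict.mk
        [("very_short", a), ("short", b), ("medium", c), ("long", d), ("very_long", e)])).items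
    = [("very_short", a + pvCountLE xs 50),
       ("short", b + pvCountLE xs 150 - pvCountLE xs 50),
       ("medium", c + pvCountLE xs 500 - pvCountLE xs 150),
       ("long", d + pvCountLE xs 1000 - pvCountLE xs 500),
       ("very_long", e + (xs.length : Int) - pvCountLE xs 1000)] := by
  induction xs generalizing a b c d e with
  | nil => simp [pvCountLE]
  | cons x xs ih =>
    have hc : ∀ bd : Int, pvCountLE (x :: xs) bd
        = pvCountLE xs bd + (if x ≤ bd then 1 else 0) := by
      intro bd
      simp only [pvCountLE, List.countP_cons]
      split <;> simp_all
    simp only [List.foldl_cons, pvStepA]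
    by_cases h1 : x ≤ 50
    · rw [show (PySem.Dict.mk
          [("very_short", a), ("short", b), ("medium", c), ("long", d), ("very_long", e)]).modify
          "very_short" 0 (· + 1) = PySem.Dict.mk
          [("very_short", a + 1), ("short", b), ("medium", c), ("long", d), ("very_long", e)] by
        apply PySem.Dict.ext; simp [PySem.Dict.modify, PySem.Dict.items_insert, PySem.Dict.getD, PySem.Dict.get?, PySem.Dict.contains]]
      rw [if_pos h1, ih]
      have h2 : x ≤ 150 := by omega
      have h3 : x ≤ 500 := by omega
      have h4 : x ≤ 1000 := by omega
      simp only [hc, List.length_cons]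
      simp [h1, h2, h3, h4]
      omega
    · by_cases h2 : x ≤ 150
      · rw [show (PySem.Dict.mk
            [("very_short", a), ("short", b), ("medium", c), ("long", d), ("very_long", e)]).modify
            "short" 0 (· + 1) = PySem.Dict.mk
            [("very_short", a), ("short", b + 1), ("medium", c), ("long", d), ("very_long", e)] by
          apply PySem.Dict.ext; simp [PySem.Dict.modify, PySem.Dict.items_insert, PySem.Dict.getD, PySem.Dict.get?, PySem.Dict.contains]]
        rw [if_neg h1, if_pos h2, ih]
        have h3 : x ≤ 500 := by omega
        have h4 : x ≤ 1000 := by omega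
        simp only [hc, List.length_cons]
        simp [h1, h2, h3, h4]
        omega
      · by_cases h3 : x ≤ 500
        · rw [show (PySem.Dict.mk
              [("very_short", a), ("short", b), ("medium", c), ("long", d), ("very_long", e)]).modify
              "medium" 0 (· + 1) = PySem.Dict.mk
              [("very_short", a), ("short", b), ("medium", c + 1), ("long", d), ("very_long", e)] by
            apply PySem.Dict.ext; simp [PySem.Dict.modify, PySem.Dict.items_insert, PySem.Dict.getD, PySem.Dict.get?, PySem.Dict.contains]]
          rw [if_neg h1, if_neg h2, if_pos h3, ih]
          have h4 : x ≤ 1000 := by omega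
          simp only [hc, List.length_cons]
          simp [h1, h2, h3, h4]
          omega
        · by_cases h4 : x ≤ 1000
          · rw [show (PySem.Dict.mk
                [("very_short", a), ("short", b), ("medium", c), ("long", d), ("very_long", e)]).modify
                "long" 0 (· + 1) = PySem.Dict.mk
                [("very_short", a), ("short", b), ("medium", c), ("long", d + 1), ("very_long", e)] by
              apply PySem.Dict.ext; simp [PySem.Dict.modify, PySem.Dict.items_insert, PySem.Dict.getD, PySem.Dict.get?, PySem.Dict.contains]]
            rw [if_neg h1, if_neg h2, if_neg h3, if_pos h4, ih]
            simp only [hc, List.length_cons]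
            simp [h1, h2, h3, h4]
            omega
          · rw [show (PySem.Dict.mk
                [("very_short", a), ("short", b), ("medium", c), ("long", d), ("very_long", e)]).modify
                "very_long" 0 (· + 1) = PySem.Dict.mk
                [("very_short", a), ("short", b), ("medium", c), ("long", d), ("very_long", e + 1)] by
              apply PySem.Dict.ext; simp [PySem.Dict.modify, PySem.Dict.items_insert, PySem.Dict.getD, PySem.Dict.get?, PySem.Dict.contains]]
            rw [if_neg h1, if_neg h2, if_neg h3, if_neg h4, ih]
            simp only [hc, List.length_cons]
            simp [h1, h2, h3, h4]
            omega

-- ===== VERDICT (by name: the statement is the Claim_ definition above) =====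
theorem categorize_lengths_py_spec : Claim_equal_categorize_lengths_py := by
  intro lengths _
  unfold Spec_categorize_lengths_py categorize_lengths_py categorize_lengths_py_alt
  have h0 : PySem.Dict.ofList
      [("very_short", (0:Int)), ("short", 0), ("medium", 0), ("long", 0), ("very_long", 0)]
      = PySem.Dict.mk [("very_short", 0), ("short", 0), ("medium", 0), ("long", 0), ("very_long", 0)] := by
    decide
  rw [h0, pvInv]
  simp
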